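-- pv_equiv track=rewrite | github.com/jaumeortola/apertium-dicts | script-spa-cat/main.py | accent_last_vowel
-- ===== SOURCE A (Python) =====
-- def accent_last_vowel(word):
--    accented_vowel = {
--       'a': 'á',
--       'e': 'é',
--       'i': 'í',
--       'o': 'ó',
--       'u': 'ú'
--    }
--    l = len(word)
--    i = 0
--    while i < l:
--       i += 1
--       if word[l - i] in 'aeiou':
--          wordlist=list(word)
--          wordlist[l - i] = accented_vowel[wordlist[l - i]]
--          return ''.join(wordlist)
--    return word
-- ===== SOURCE B (Python) =====
-- def accent_last_vowel(word):
--     accented_vowel = {'a': 'á', 'e': 'é', 'i': 'í', 'o': 'ó', 'u': 'ú'}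
--     last_idx = -1
--     for i, ch in enumerate(word):
--         if ch in 'aeiou':
--             last_idx = i
--     if last_idx == -1:
--         return word
--     wordlist = list(word)
--     wordlist[last_idx] = accented_vowel[wordlist[last_idx]]
--     return ''.join(wordlist)
-- ===== Notes on version B (the rewrite author's own statement) =====
-- stated objective: alternative
-- what changed: Replaces A's backward while-loop with early return (indexing word[l-i] and rebuilding inside the loop) by a single forward enumerate pass that remembers the last vowel index and patches the word once after the loop.
import Mathlib
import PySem

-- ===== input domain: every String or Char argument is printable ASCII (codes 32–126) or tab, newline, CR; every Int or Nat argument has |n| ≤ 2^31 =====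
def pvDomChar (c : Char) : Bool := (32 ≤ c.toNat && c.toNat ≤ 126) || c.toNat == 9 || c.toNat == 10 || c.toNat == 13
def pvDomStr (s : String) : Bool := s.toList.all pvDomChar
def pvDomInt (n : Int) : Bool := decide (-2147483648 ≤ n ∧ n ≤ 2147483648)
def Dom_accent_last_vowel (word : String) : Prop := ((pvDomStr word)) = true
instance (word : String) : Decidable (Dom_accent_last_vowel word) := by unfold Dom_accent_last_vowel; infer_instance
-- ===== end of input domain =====

-- B replaces A's backward while-loop with early return by a forward pass
-- remembering the last vowel index and a single patch afterwards (objective: alternative).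

-- shared constants of both Pythons: the vowel test `in 'aeiou'` and the accent dict
def isVow (c : Char) : Bool := "aeiou".toList.contains c
def accChar (c : Char) : Char :=
  if c = 'a' then 'á' else if c = 'e' then 'é' else if c = 'i' then 'í'
  else if c = 'o' then 'ó' else if c = 'u' then 'ú' else c

-- ===== PORT A =====
-- A's while loop: i counts up, inspects word[l - i] and returns early on a vowel
def accentA_loop (word : String) (cs : List Char) (l i : Nat) : String :=
  if i < l then
    let i' := i + 1
    let c := cs.getD (l - i') ' '   -- word[l - i] after the increment; index always in range here
    if isVow c then String.mk (cs.set (l - i') (accChar c))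
    else accentA_loop word cs l i'
  else word
termination_by l - i
decreasing_by omega

def accent_last_vowel (word : String) : String :=
  accentA_loop word word.toList word.toList.length 0

-- ===== PORT B =====
def accent_last_vowel_alt (word : String) : String :=
  let cs := word.toList
  let last_idx : Int :=
    (PySem.List.enumerate cs 0).foldl
      (fun acc p => if isVow p.2 then p.1 else acc) (-1)
  if last_idx = -1 then word
  else
    let c := cs.getD last_idx.toNat ' '   -- wordlist[last_idx]; in range since last_idx ≥ 0 was set
    String.mk (cs.set last_idx.toNat (accChar c))

-- ===== PRECONDITION & SPEC =====
def Spec_accent_last_vowel (word : String) (out : String) : Prop := out = accent_last_vowel_alt word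
instance (word : String) (out : String) : Decidable (Spec_accent_last_vowel word out) := by unfold Spec_accent_last_vowel; infer_instance

-- ===== CLAIM (what is proved, stated in full; the proofs are below) =====
def Claim_equal_accent_last_vowel : Prop := ∀ (word : String), Dom_accent_last_vowel word → Spec_accent_last_vowel word (accent_last_vowel word)

-- ===== LEMMAS AND PROOFS =====

-- index of the last vowel of a list, if any
def lastV : List Char → Option Nat
  | [] => none
  | c :: cs =>
    match lastV cs with
    | some j => some (j + 1)
    | none => if isVow c then some 0 else none

theorem lastV_append_single (xs : List Char) (c : Char) :
    lastV (xs ++ [c]) = if isVow c then some xs.length else lastV xs := by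
  induction xs with
  | nil => by_cases h : isVow c <;> simp [lastV, h]
  | cons x xs ih =>
    simp only [List.cons_append, lastV, ih]
    by_cases h : isVow c
    · simp [h]
    · simp only [h]
      cases lastV xs <;> simp

theorem foldl_lastV (cs : List Char) (k : Int) (acc : Int) :
    (PySem.List.enumerate cs k).foldl
      (fun acc p => if isVow p.2 then p.1 else acc) acc =
    (match lastV cs with
     | none => acc
     | some j => k + (j : Int)) := by
  induction cs generalizing k acc with
  | nil => simp [PySem.List.enumerate_nil, lastV]
  | cons c cs ih =>
    rw [PySem.List.enumerate_cons]
    simp only [List.foldl_cons, lastV]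
    rw [ih]
    cases hcs : lastV cs with
    | some j =>
      simp only []
      push_cast; ring_nf
    | none =>
      by_cases h : isVow c <;> simp [h]

theorem accentA_loop_eq (word : String) (cs : List Char) (l : Nat) (hl : l = cs.length) :
    ∀ (m i : Nat), i + m = l →
    accentA_loop word cs l i =
      (match lastV (cs.take m) with
       | none => word
       | some j => String.mk (cs.set j (accChar (cs.getD j ' ')))) := by
  intro m
  induction m with
  | zero =>
    intro i hi
    rw [accentA_loop]
    simp [lastV, show ¬ i < l by omega]
  | succ m ih =>
    intro i hi
    have hm : m + 1 ≤ cs.length := by omega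
    have hidx : l - (i + 1) = m := by omega
    have htake : cs.take (m + 1) = cs.take m ++ [cs.getD m ' '] := by
      have hmlt : m < cs.length := by omega
      rw [List.getD_eq_getElem cs ' ' hmlt]
      exact List.take_succ_eq_append_getElem hmlt
    rw [accentA_loop]
    simp only [show i < l by omega, if_true, hidx]
    rw [htake, lastV_append_single]
    simp only [List.length_take, show min m cs.length = m from by omega]
    by_cases h : isVow (cs.getD m ' ')
    · rw [if_pos h, if_pos h]
    · rw [if_neg h, if_neg h]
      exact ih (i + 1) (by omega)

theorem accent_last_vowel_eq_alt (word : String) :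
    accent_last_vowel word = accent_last_vowel_alt word := by
  unfold accent_last_vowel
  rw [accentA_loop_eq word word.toList word.toList.length rfl word.toList.length 0 (by omega),
    List.take_length]
  unfold accent_last_vowel_alt
  simp only [foldl_lastV]
  cases h : lastV word.toList with
  | none => simp
  | some j =>
    dsimp only
    rw [if_neg (by omega : ¬ ((0 : Int) + (j : Int) = -1))]
    have : ((0 : Int) + (j : Int)).toNat = j := by omega
    rw [this]

-- ===== VERDICT (by name: the statement is the Claim_ definition above) =====
theorem accent_last_vowel_spec : Claim_equal_accent_last_vowel := by
  intro word _
  unfold Spec_accent_last_vowel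
  exact accent_last_vowel_eq_alt word
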